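-- pv_equiv track=rewrite | github.com/Laura-ElenaComanac/AI-Projects | Genetic Algorithm/model/utils.py | interpretLabels
-- ===== SOURCE A (Python) =====
-- def interpretLabels(representation):  # labels to numbers
--     map = {}
--     newRepresentation = []
--     currentCommunity = 0
--
--     for label in representation:
--         if label not in map:
--             currentCommunity += 1
--             map[label] = currentCommunity
--         newRepresentation.append(map[label])
--
--     return newRepresentation
-- ===== SOURCE B (Python) =====
-- def interpretLabels(representation):
--     # Stamp whole equivalence classes: whenever position i is still unassigned,
--     # its label is new; give every occurrence of that label the next id at once.
--     out = [0] * len(representation)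
--     nextId = 0
--     for i, label in enumerate(representation):
--         if out[i] == 0:
--             nextId += 1
--             out = [nextId if x == label else y for x, y in zip(representation, out)]
--     return out
-- ===== Notes on version B (the rewrite author's own statement) =====
-- stated objective: alternative
-- what changed: Instead of maintaining a label-to-number dict and translating position by position, B keeps no mapping at all: it pre-fills a zero output array and, each time it meets a still-unassigned position, stamps every occurrence of that label with the next id in one whole-list substitution pass (class-stamping).
import Mathlib
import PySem

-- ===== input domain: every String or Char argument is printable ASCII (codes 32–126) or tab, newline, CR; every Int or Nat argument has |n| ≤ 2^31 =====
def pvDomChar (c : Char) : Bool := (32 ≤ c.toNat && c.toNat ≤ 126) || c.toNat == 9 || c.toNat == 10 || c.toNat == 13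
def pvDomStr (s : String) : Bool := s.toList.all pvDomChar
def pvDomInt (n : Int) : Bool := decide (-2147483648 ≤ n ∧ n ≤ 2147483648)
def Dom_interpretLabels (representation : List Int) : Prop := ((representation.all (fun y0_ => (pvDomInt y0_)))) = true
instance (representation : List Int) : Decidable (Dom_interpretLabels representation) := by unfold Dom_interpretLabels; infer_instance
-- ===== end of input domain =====

-- B drops A's incremental label->number dict entirely: it pre-fills a zero array and, at each
-- still-unassigned position, stamps every occurrence of that label with the next id in one
-- whole-list substitution pass (class-stamping); same return value.

-- ===== PORT A =====
-- literal transliteration of A's loop; after the branch, label is always a key of map, so getD 0 is exact for map[label]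
def interpretLabels (representation : List Int) : List Int :=
  (representation.foldl
    (fun (st : PySem.Dict Int Int × List Int × Int) label =>
      let m := st.1
      let newRep := st.2.1
      let cur := st.2.2
      let mc : PySem.Dict Int Int × Int :=
        if m.contains label then (m, cur) else (m.insert label (cur + 1), cur + 1)
      (mc.1, newRep ++ [mc.1.getD label 0], mc.2))
    ((PySem.Dict.empty : PySem.Dict Int Int), ([] : List Int), (0 : Int))).2.1

-- ===== PORT B =====
-- literal transliteration of Source B: out starts as [0]*len, fold over enumerate(representation);
-- out[i] is always in range, so pyGetD 0 is exact; the comprehension over zip(representation, out)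
-- is List.zipWith on the same two lists
def interpretLabels_alt (representation : List Int) : List Int :=
  ((PySem.List.enumerate representation 0).foldl
    (fun (st : List Int × Int) p =>
      let out := st.1
      let nextId := st.2
      if PySem.List.pyGetD out p.1 0 == 0 then
        (List.zipWith (fun x y => if x == p.2 then nextId + 1 else y) representation out,
         nextId + 1)
      else st)
    (List.replicate representation.length 0, 0)).1

-- ===== PRECONDITION & SPEC =====
def Spec_interpretLabels (representation : List Int) (out : List Int) : Prop := out = interpretLabels_alt representation
instance (representation : List Int) (out : List Int) : Decidable (Spec_interpretLabels representation out) := by unfold Spec_interpretLabels; infer_instance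

-- ===== CLAIM (what is proved, stated in full; the proofs are below) =====
def Claim_equal_interpretLabels : Prop := ∀ (representation : List Int), Dom_interpretLabels representation → Spec_interpretLabels representation (interpretLabels representation)

-- ===== LEMMAS AND PROOFS =====

-- invariant of A's loop: with the dict mapping each already-seen label to (its index among first
-- appearances)+1 and cur = number of seen labels, the loop appends the 1-based dedup indices
lemma loopA_spec (rest : List Int) (seen : List Int) (d : PySem.Dict Int Int) (out : List Int)
    (hnd : seen.Nodup)
    (hc : ∀ x, d.contains x = decide (x ∈ seen))
    (hd : ∀ x, x ∈ seen → d.getD x 0 = (seen.idxOf x : Int) + 1) :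
    (rest.foldl
      (fun (st : PySem.Dict Int Int × List Int × Int) label =>
        let m := st.1
        let newRep := st.2.1
        let cur := st.2.2
        let mc : PySem.Dict Int Int × Int :=
          if m.contains label then (m, cur) else (m.insert label (cur + 1), cur + 1)
        (mc.1, newRep ++ [mc.1.getD label 0], mc.2))
      (d, out, (seen.length : Int))).2.1
      = out ++ rest.map (fun x => (((PySem.Set.update seen rest).idxOf x : Int) + 1)) := by
  induction rest generalizing seen d out with
  | nil => simp [PySem.Set.update_nil]
  | cons x xs ih =>
    simp only [List.foldl_cons, List.map_cons]
    by_cases hx : x ∈ seen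
    · -- seen before: dict and counter unchanged
      have hct : d.contains x = true := by rw [hc]; simp [hx]
      rw [hct]
      simp only [if_true]
      have hupd : PySem.Set.update seen (x :: xs) = PySem.Set.update seen xs := by
        rw [PySem.Set.update_cons, PySem.Set.add_of_mem hx]
      obtain ⟨t, ht⟩ : ∃ t, PySem.Set.update seen xs = seen ++ t :=
        ⟨_, PySem.Set.update_eq_append_filter seen xs⟩
      have hidx : ((PySem.Set.update seen (x :: xs)).idxOf x : Int) = (seen.idxOf x : Int) := by
        rw [hupd, ht, List.idxOf_append_of_mem hx]
      rw [ih seen d (out ++ [d.getD x 0]) hnd hc hd]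
      rw [hd x hx, hidx, hupd]
      simp
    · -- first appearance: label is inserted with value cur+1, seen grows by [x]
      have hcf : d.contains x = false := by rw [hc]; simp [hx]
      rw [hcf]
      simp only [Bool.false_eq_true, if_false]
      set seen' := seen ++ [x] with hs'
      have hnd' : seen'.Nodup := by
        rw [hs']; simp only [List.nodup_append, List.nodup_cons, List.nodup_nil]
        refine ⟨hnd, ⟨by simp, by simp⟩, ?_⟩
        intro a ha b hb
        simp at hb; subst hb
        intro h; exact hx (h ▸ ha)
      have hlen : ((seen.length : Int) + 1) = (seen'.length : Int) := by
        rw [hs']; simp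
      have hidx_x : (seen'.idxOf x : Int) = (seen.length : Int) := by
        rw [hs', List.idxOf_append_of_notMem hx]; simp
      have hc' : ∀ y, (d.insert x ((seen.length : Int) + 1)).contains y = decide (y ∈ seen') := by
        intro y
        rw [PySem.Dict.contains_insert, hc, hs']
        by_cases hy : y = x <;> simp [hy]
      have hd' : ∀ y, y ∈ seen' → (d.insert x ((seen.length : Int) + 1)).getD y 0
          = (seen'.idxOf y : Int) + 1 := by
        intro y hy
        rw [PySem.Dict.getD_insert]
        by_cases hyx : y = x
        · subst hyx; rw [if_pos rfl, hidx_x]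
        · rw [if_neg hyx]
          have hys : y ∈ seen := by
            rcases List.mem_append.mp (hs' ▸ hy) with h | h
            · exact h
            · simp at h; exact absurd h hyx
          rw [hd y hys, hs', List.idxOf_append_of_mem hys]
      have hval : (d.insert x ((seen.length : Int) + 1)).getD x 0 = (seen'.idxOf x : Int) + 1 := by
        rw [PySem.Dict.getD_insert, if_pos rfl, hidx_x]
      have hupd : PySem.Set.update seen (x :: xs) = PySem.Set.update seen' xs := by
        rw [PySem.Set.update_cons, PySem.Set.add_of_not_mem hx]
      obtain ⟨t, ht⟩ : ∃ t, PySem.Set.update seen' xs = seen' ++ t :=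
        ⟨_, PySem.Set.update_eq_append_filter seen' xs⟩
      have hxseen' : x ∈ seen' := by rw [hs']; simp
      have hidx : ((PySem.Set.update seen (x :: xs)).idxOf x : Int) = (seen'.idxOf x : Int) := by
        rw [hupd, ht, List.idxOf_append_of_mem hxseen']
      have IH := ih seen' (d.insert x ((seen.length : Int) + 1))
            (out ++ [(d.insert x ((seen.length : Int) + 1)).getD x 0]) hnd' hc' hd'
      rw [← hlen] at IH
      rw [IH, hval, hidx, hupd]
      simp

-- A's result is the 1-based first-appearance index at every position
lemma A_eq_map (representation : List Int) :
    interpretLabels representation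
      = representation.map
          (fun x => ((PySem.List.dedup representation).idxOf x : Int) + 1) := by
  have hA := loopA_spec representation [] PySem.Dict.empty []
    (List.nodup_nil)
    (by intro x; simp [PySem.Dict.contains_empty])
    (by intro x hx; simp at hx)
  rw [interpretLabels]
  simpa [PySem.Set.update_nil_left, PySem.List.dedup_eq_ofList] using hA

-- the partial output after processing the prefix `pre`: stamped positions carry their final value
def stampF (representation pre : List Int) (x : Int) : Int :=
  if x ∈ pre then ((PySem.List.dedup representation).idxOf x : Int) + 1 else 0

-- invariant of B's loop: with the processed prefix `pre` stamped and nextId = number of distinct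
-- labels in `pre`, folding the rest stamps everything
lemma loopB_spec (representation : List Int) (xs pre : List Int)
    (h : representation = pre ++ xs) :
    ((PySem.List.enumerate xs (pre.length : Int)).foldl
      (fun (st : List Int × Int) p =>
        let out := st.1
        let nextId := st.2
        if PySem.List.pyGetD out p.1 0 == 0 then
          (List.zipWith (fun x y => if x == p.2 then nextId + 1 else y) representation out,
           nextId + 1)
        else st)
      (representation.map (stampF representation pre),
       ((PySem.List.dedup pre).length : Int))).1
    = representation.map (stampF representation (pre ++ xs)) := by
  induction xs generalizing pre with
  | nil => simp [PySem.List.enumerate_nil]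
  | cons a xs ih =>
    rw [PySem.List.enumerate_cons, List.foldl_cons]
    -- out[pre.length] = stampF representation pre a
    have hget : PySem.List.pyGetD (representation.map (stampF representation pre))
        ((pre.length : Int)) 0 = stampF representation pre a := by
      rw [PySem.List.pyGetD_natCast]
      rw [h, List.map_append, List.map_cons]
      rw [List.getD_eq_getElem?_getD]
      rw [List.getElem?_append_right (by simp)]
      simp
    dsimp only
    by_cases ha : a ∈ pre
    · -- already stamped: stampF … a = idxOf + 1 ≠ 0, branch not taken
      have hne : stampF representation pre a ≠ 0 := by
        rw [stampF, if_pos ha]; omega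
      rw [hget]
      simp only [beq_iff_eq, hne, if_false]
      have hpre' : representation = (pre ++ [a]) ++ xs := by rw [h]; simp
      have hlen : ((pre.length : Int) + 1) = (((pre ++ [a]).length : Int)) := by simp
      have hdedup : PySem.List.dedup (pre ++ [a]) = PySem.List.dedup pre := by
        simp only [PySem.List.dedup_eq_ofList, PySem.Set.ofList_append]
        rw [PySem.Set.update_cons, PySem.Set.update_nil,
          PySem.Set.add_of_mem (by rw [PySem.Set.mem_ofList]; exact ha)]
      have hmap : representation.map (stampF representation pre)
          = representation.map (stampF representation (pre ++ [a])) := by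
        apply List.map_congr_left
        intro x _
        rw [stampF, stampF]
        by_cases hx : x = a
        · subst hx; simp [ha]
        · simp [hx]
      rw [hmap, hlen, ← hdedup]
      have := ih (pre ++ [a]) hpre'
      dsimp only at this
      simp only [beq_iff_eq] at this ⊢
      rw [show (pre ++ [a]) ++ xs = pre ++ a :: xs by simp] at this
      exact this
    · -- first occurrence: stamp the whole class of a with nextId + 1
      have heq : stampF representation pre a = 0 := by rw [stampF, if_neg ha]
      rw [hget]
      simp only [heq, beq_self_eq_true, if_true]
      have hpre' : representation = (pre ++ [a]) ++ xs := by rw [h]; simp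
      have hlen : ((pre.length : Int) + 1) = (((pre ++ [a]).length : Int)) := by simp
      -- the index a receives is the number of labels already stamped
      have hidx : ((PySem.List.dedup representation).idxOf a : Int)
          = ((PySem.List.dedup pre).length : Int) := by
        have hda : a ∉ PySem.List.dedup pre := by
          rw [PySem.List.mem_dedup]; exact ha
        have : PySem.List.dedup representation
            = (PySem.List.dedup pre ++ [a])
              ++ (PySem.Set.ofList xs).filter
                  (fun y => !(PySem.Set.contains (PySem.List.dedup pre ++ [a]) y)) := by
          rw [h, PySem.List.dedup_eq_ofList, PySem.Set.ofList_append, PySem.Set.update_cons,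
            PySem.Set.add_of_not_mem (by rw [← PySem.List.dedup_eq_ofList, PySem.List.mem_dedup]; exact ha)]
          rw [← PySem.List.dedup_eq_ofList, PySem.Set.update_eq_append_filter]
        rw [this, List.idxOf_append_of_mem (by simp),
          List.idxOf_append_of_notMem hda]
        simp
      have hdedup : ((PySem.List.dedup (pre ++ [a])).length : Int)
          = ((PySem.List.dedup pre).length : Int) + 1 := by
        simp only [PySem.List.dedup_eq_ofList, PySem.Set.ofList_append]
        rw [PySem.Set.update_cons, PySem.Set.update_nil,
          PySem.Set.add_of_not_mem (by rw [PySem.Set.mem_ofList]; exact ha)]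
        simp [← PySem.List.dedup_eq_ofList]
      -- the substitution pass produces exactly the prefix-(pre ++ [a]) stamping
      have hstamp : List.zipWith
            (fun x y => if x == a then ((PySem.List.dedup pre).length : Int) + 1 else y)
            representation (representation.map (stampF representation pre))
          = representation.map (stampF representation (pre ++ [a])) := by
        rw [List.zipWith_map_right, List.zipWith_self]
        apply List.map_congr_left
        intro x _
        by_cases hx : x = a
        · subst hx
          simp only [beq_self_eq_true, if_true, stampF]
          rw [if_pos (by simp), ← hidx]
        · simp only [beq_iff_eq, hx, if_false, stampF]
          have : (x ∈ pre ++ [a]) ↔ (x ∈ pre) := by simp [hx]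
          rw [if_congr this rfl rfl]
      rw [hstamp, hlen, ← hdedup]
      have := ih (pre ++ [a]) hpre'
      dsimp only at this
      simp only [beq_iff_eq] at this ⊢
      rw [show (pre ++ [a]) ++ xs = pre ++ a :: xs by simp] at this
      exact this

-- ===== VERDICT (by name: the statement is the Claim_ definition above) =====
theorem interpretLabels_spec : Claim_equal_interpretLabels := by
  intro representation _
  unfold Spec_interpretLabels
  rw [A_eq_map, interpretLabels_alt]
  have h0 : representation.map (stampF representation [])
      = List.replicate representation.length 0 := by
    have hz : stampF representation [] = fun _ => (0 : Int) :=
      funext (fun x => by simp [stampF])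
    rw [hz, List.map_const']
  have h := loopB_spec representation representation [] (by simp)
  have hd0 : ((PySem.List.dedup ([] : List Int)).length : Int) = 0 := rfl
  have hl0 : ((([] : List Int).length : Nat) : Int) = 0 := rfl
  rw [hd0, hl0, h0] at h
  rw [h]
  apply List.map_congr_left
  intro x hx
  rw [stampF, if_pos (by simpa using hx)]
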